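-- pv_equiv track=rewrite | github.com/barutx/py_etudes | cs50/hello/EDX lecture/MITX6_0001_reading2.py | get_root_power
-- ===== SOURCE A (Python) =====
-- def get_root_power(integer):
--     root_pwr = {}
--     for root in range(abs(integer) + 1):
--         for pwr in range(1,6):
--             if root ** pwr == integer:
--                 pwr = root_pwr.get(root,pwr)
--                 root_pwr[root] = pwr
--     if len(root_pwr) != 0:
--         return root_pwr
--     else:
--         return None
-- ===== SOURCE B (Python) =====
-- def get_root_power(integer):
--     # O(sqrt(n)): only roots up to sqrt(integer) can give powers 2..5;
--     # integer itself is always a root with power one (for nonnegative input).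
--     if integer < 0:
--         return None
--     if integer <= 1:
--         return {integer: 1}
--     res = {}
--     r = 2
--     while r * r <= integer:
--         for k in range(2, 6):
--             if r ** k == integer:
--                 res[r] = k
--                 break
--         r += 1
--     res[integer] = 1
--     return res
-- ===== Notes on version B (the rewrite author's own statement) =====
-- stated objective: faster
-- what changed: Instead of scanning every root from zero to |integer| with all powers one to five, B answers inputs below two directly, scans only roots from two up to the square root of integer for powers two to five (first match wins), and appends the trivial root with power one last.
import Mathlib
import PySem

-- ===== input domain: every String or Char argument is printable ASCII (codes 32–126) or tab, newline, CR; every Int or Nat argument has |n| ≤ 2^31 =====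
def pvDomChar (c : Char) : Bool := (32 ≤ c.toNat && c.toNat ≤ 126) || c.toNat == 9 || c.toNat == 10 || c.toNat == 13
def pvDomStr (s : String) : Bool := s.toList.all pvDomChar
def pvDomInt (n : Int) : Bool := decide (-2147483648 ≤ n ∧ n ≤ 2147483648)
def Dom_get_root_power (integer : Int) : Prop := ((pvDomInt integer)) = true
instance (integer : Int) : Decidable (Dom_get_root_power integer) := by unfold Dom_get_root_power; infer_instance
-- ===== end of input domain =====

-- B replaces A's scan of every root 0..|integer| (all powers 1..5) by direct answers for
-- integer < 2 plus a scan of roots 2..sqrt(integer) for powers 2..5, appending integer->1 last.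


-- ===== PORT A =====
-- inner 'for pwr in range(1,6)' loop; exponent pwr is always 1..5, so '**' is '^ pwr.toNat'
def innerA (integer root : Int) (d : PySem.Dict Int Int) : PySem.Dict Int Int :=
  (PySem.List.pyRange 1 6 1).foldl
    (fun d pwr => if root ^ pwr.toNat == integer then d.insert root (d.getD root pwr) else d) d

def get_root_power (integer : Int) : Option (List (Int × Int)) :=
  let root_pwr := (PySem.List.pyRange 0 (|integer| + 1) 1).foldl
    (fun d root => innerA integer root d) PySem.Dict.empty
  if root_pwr.size ≠ 0 then some root_pwr.items else none

-- ===== PORT B =====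
-- 'while r * r <= integer' loop of Source B; res's keys are the strictly increasing r, so the
-- dict is kept as its items list (each res[r] = k is an append of a fresh key)
def bLoop (integer r : Int) (res : List (Int × Int)) : List (Int × Int) :=
  if h : r * r ≤ integer then
    let res' := match (PySem.List.pyRange 2 6 1).find? (fun k => r ^ k.toNat == integer) with
      | some k => res ++ [(r, k)]
      | none => res
    bLoop integer (r + 1) res'
  else res
termination_by (integer + 1 - r).toNat
decreasing_by
  have hr : r ≤ integer := by nlinarith
  omega

def get_root_power_alt (integer : Int) : Option (List (Int × Int)) :=
  if integer < 0 then none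
  else if integer ≤ 1 then some [(integer, 1)]
  else some (bLoop integer 2 [] ++ [(integer, 1)])  -- res[integer] = 1 appends: integer is a fresh key

-- ===== PRECONDITION & SPEC =====
def Spec_get_root_power (integer : Int) (out : Option (List (Int × Int))) : Prop := out = get_root_power_alt integer
instance (integer : Int) (out : Option (List (Int × Int))) : Decidable (Spec_get_root_power integer out) := by unfold Spec_get_root_power; infer_instance

-- ===== CLAIM (what is proved, stated in full; the proofs are below) =====
def Claim_equal_get_root_power : Prop := ∀ (integer : Int), Dom_get_root_power integer → Spec_get_root_power integer (get_root_power integer)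


-- ===== LEMMAS AND PROOFS =====

-- powers of a base ≥ 2 are strictly increasing in the exponent
theorem pv_pow_lt {r : Int} (hr : 2 ≤ r) {i j : Nat} (hij : i < j) : r ^ i < r ^ j :=
  pow_lt_pow_right₀ (by omega) hij

theorem pv_dict_fresh {d : PySem.Dict Int Int} {r : Int} (h : ∀ p ∈ d.items, p.1 < r) :
    d.contains r = false := by
  rw [PySem.Dict.contains_eq_decide_mem_keys]
  simp only [decide_eq_false_iff_not, PySem.Dict.keys, List.mem_map]
  rintro ⟨p, hp, rfl⟩
  exact lt_irrefl _ (h p hp)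

theorem pv_range15 : PySem.List.pyRange 1 6 1 = [1,2,3,4,5] := by decide
theorem pv_range25 : PySem.List.pyRange 2 6 1 = [2,3,4,5] := by decide

theorem innerA_id {n r : Int} (d : PySem.Dict Int Int)
    (h1 : r ≠ n) (h2 : r ^ 2 ≠ n) (h3 : r ^ 3 ≠ n) (h4 : r ^ 4 ≠ n) (h5 : r ^ 5 ≠ n) :
    innerA n r d = d := by
  simp [innerA, pv_range15, h1, h2, h3, h4, h5]

theorem innerA_hit {n r : Int} (d : PySem.Dict Int Int) (hr : 2 ≤ r) (k : Int)
    (hk : k = 1 ∨ k = 2 ∨ k = 3 ∨ k = 4 ∨ k = 5) (hpow : r ^ k.toNat = n) :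
    innerA n r d = d.insert r (d.getD r k) := by
  have h12 : r < r ^ (2:Nat) := by
    have := pv_pow_lt hr (show (1:Nat) < 2 by norm_num); rwa [pow_one] at this
  have h23 : r ^ (2:Nat) < r ^ (3:Nat) := pv_pow_lt hr (by norm_num)
  have h34 : r ^ (3:Nat) < r ^ (4:Nat) := pv_pow_lt hr (by norm_num)
  have h45 : r ^ (4:Nat) < r ^ (5:Nat) := pv_pow_lt hr (by norm_num)
  have t2 : r < r ^ (2:Nat) := h12
  have t3 : r < r ^ (3:Nat) := h12.trans h23
  have t4 : r < r ^ (4:Nat) := t3.trans h34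
  have t5 : r < r ^ (5:Nat) := t4.trans h45
  rcases hk with rfl|rfl|rfl|rfl|rfl <;> norm_num [Int.toNat] at hpow
  · subst hpow
    simp [innerA, pv_range15, ne_of_gt t2, ne_of_gt t3, ne_of_gt t4, ne_of_gt t5]
  · have g1 : r ≠ n := by rw [← hpow]; exact ne_of_lt t2
    have g3 : r ^ (3:Nat) ≠ n := by rw [← hpow]; exact ne_of_gt h23
    have g4 : r ^ (4:Nat) ≠ n := by rw [← hpow]; exact ne_of_gt (h23.trans h34)
    have g5 : r ^ (5:Nat) ≠ n := by rw [← hpow]; exact ne_of_gt ((h23.trans h34).trans h45)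
    simp [innerA, pv_range15, hpow, g1, g3, g4, g5]
  · have g1 : r ≠ n := by rw [← hpow]; exact ne_of_lt t3
    have g2 : r ^ (2:Nat) ≠ n := by rw [← hpow]; exact ne_of_lt h23
    have g4 : r ^ (4:Nat) ≠ n := by rw [← hpow]; exact ne_of_gt h34
    have g5 : r ^ (5:Nat) ≠ n := by rw [← hpow]; exact ne_of_gt (h34.trans h45)
    simp [innerA, pv_range15, hpow, g1, g2, g4, g5]
  · have g1 : r ≠ n := by rw [← hpow]; exact ne_of_lt t4
    have g2 : r ^ (2:Nat) ≠ n := by rw [← hpow]; exact ne_of_lt (h23.trans h34)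
    have g3 : r ^ (3:Nat) ≠ n := by rw [← hpow]; exact ne_of_lt h34
    have g5 : r ^ (5:Nat) ≠ n := by rw [← hpow]; exact ne_of_gt h45
    simp [innerA, pv_range15, hpow, g1, g2, g3, g5]
  · have g1 : r ≠ n := by rw [← hpow]; exact ne_of_lt t5
    have g2 : r ^ (2:Nat) ≠ n := by rw [← hpow]; exact ne_of_lt ((h23.trans h34).trans h45)
    have g3 : r ^ (3:Nat) ≠ n := by rw [← hpow]; exact ne_of_lt (h34.trans h45)
    have g4 : r ^ (4:Nat) ≠ n := by rw [← hpow]; exact ne_of_lt h45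
    simp [innerA, pv_range15, hpow, g1, g2, g3, g4]

-- integer square root, used only in the proofs
def sI (n : Int) : Int := (Nat.sqrt n.toNat : Int)

theorem pv_sq_le_iff {n r : Int} (hn : 0 ≤ n) (hr : 0 ≤ r) : r * r ≤ n ↔ r ≤ sI n := by
  rw [sI]
  rcases Int.eq_ofNat_of_zero_le hr with ⟨a, rfl⟩
  rcases Int.eq_ofNat_of_zero_le hn with ⟨b, rfl⟩
  constructor
  · intro h; exact_mod_cast Nat.le_sqrt.mpr (by exact_mod_cast h)
  · intro h; exact_mod_cast Nat.le_sqrt.mp (by exact_mod_cast h)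

theorem pv_sI_lt_self {n : Int} (hn : 2 ≤ n) : sI n < n := by
  have h : Nat.sqrt n.toNat < n.toNat := Nat.sqrt_lt_self (by omega)
  rw [sI]; omega

theorem pv_one_le_sI {n : Int} (hn : 2 ≤ n) : 1 ≤ sI n := by
  have h : 1 ≤ Nat.sqrt n.toNat := Nat.le_sqrt.mpr (by omega)
  rw [sI]; omega

theorem bLoop_stop {n r : Int} (acc : List (Int × Int)) (h : ¬ r * r ≤ n) : bLoop n r acc = acc := by
  rw [bLoop]; simp [h]

theorem bLoop_acc (N : Nat) : ∀ (n r : Int) (acc : List (Int × Int)), (n + 1 - r).toNat ≤ N →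
    bLoop n r acc = acc ++ bLoop n r [] := by
  induction N with
  | zero =>
    intro n r acc h
    have hg : ¬ r * r ≤ n := by intro hg; have hr : r ≤ n := by nlinarith
                                omega
    rw [bLoop_stop _ hg, bLoop_stop _ hg, List.append_nil]
  | succ N ih =>
    intro n r acc h
    by_cases hg : r * r ≤ n
    · have hr : r ≤ n := by nlinarith
      conv_lhs => rw [bLoop]
      conv_rhs => rw [bLoop]
      simp only [dif_pos hg]
      cases hf : (PySem.List.pyRange 2 6 1).find? (fun k => r ^ k.toNat == n) with
      | none =>
        simp only
        exact ih n (r+1) acc (by omega)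
      | some k =>
        simp only [List.nil_append]
        rw [ih n (r+1) (acc ++ [(r,k)]) (by omega), ih n (r+1) [(r,k)] (by omega)]
        simp
    · rw [bLoop_stop _ hg, bLoop_stop _ hg, List.append_nil]

theorem bLoop_step {n r : Int} (h : r * r ≤ n) :
    bLoop n r [] = (match (PySem.List.pyRange 2 6 1).find? (fun k => r ^ k.toNat == n) with
      | some k => [(r, k)] | none => ([] : List (Int × Int))) ++ bLoop n (r + 1) [] := by
  rw [bLoop, dif_pos h]
  cases hf : (PySem.List.pyRange 2 6 1).find? (fun k => r ^ k.toNat == n) with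
  | none => simp
  | some k =>
    simp only [List.nil_append]
    exact bLoop_acc (n + 1 - (r+1)).toNat n (r+1) [(r,k)] le_rfl

theorem bLoop_mem (N : Nat) : ∀ (n r : Int) (acc : List (Int × Int)), (n + 1 - r).toNat ≤ N →
    ∀ p ∈ bLoop n r acc, p ∈ acc ∨ (r ≤ p.1 ∧ p.1 * p.1 ≤ n) := by
  induction N with
  | zero =>
    intro n r acc h p hp
    have hg : ¬ r * r ≤ n := by intro hg; have hr : r ≤ n := by nlinarith
                                omega
    rw [bLoop_stop _ hg] at hp; exact Or.inl hp
  | succ N ih =>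
    intro n r acc h p hp
    by_cases hg : r * r ≤ n
    · have hr : r ≤ n := by nlinarith
      rw [bLoop, dif_pos hg] at hp
      cases hf : (PySem.List.pyRange 2 6 1).find? (fun k => r ^ k.toNat == n) with
      | none =>
        rw [hf] at hp
        rcases ih n (r+1) acc (by omega) p hp with h' | h'
        · exact Or.inl h'
        · exact Or.inr ⟨by omega, h'.2⟩
      | some k =>
        rw [hf] at hp
        rcases ih n (r+1) (acc ++ [(r,k)]) (by omega) p hp with h' | h'
        · rcases List.mem_append.mp h' with h'' | h''
          · exact Or.inl h''
          · simp at h''; subst h''; exact Or.inr ⟨le_refl _, hg⟩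
        · exact Or.inr ⟨by omega, h'.2⟩
    · rw [bLoop_stop _ hg] at hp; exact Or.inl hp

theorem fold_mid {n : Int} (hn : 2 ≤ n) : ∀ (N : Nat) (r : Int) (d : PySem.Dict Int Int),
    (sI n + 1 - r).toNat ≤ N → 2 ≤ r → (∀ p ∈ d.items, p.1 < r) →
    ((PySem.List.pyRange r (sI n + 1) 1).foldl (fun d root => innerA n root d) d).items
      = d.items ++ bLoop n r [] := by
  intro N
  induction N with
  | zero =>
    intro r d hN hr hkeys
    have hg : ¬ r * r ≤ n := by
      intro hg; have := (pv_sq_le_iff (by omega) (by omega)).mp hg; omega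
    rw [PySem.List.pyRange_one_eq_nil (by omega), List.foldl_nil, bLoop_stop _ hg, List.append_nil]
  | succ N ih =>
    intro r d hN hr hkeys
    by_cases hr_le : r ≤ sI n
    · rw [PySem.List.pyRange_one_cons (by omega : r < sI n + 1), List.foldl_cons]
      have hg : r * r ≤ n := (pv_sq_le_iff (by omega) (by omega)).mpr hr_le
      have hrltn : r < n := lt_of_le_of_lt hr_le (pv_sI_lt_self hn)
      cases hf : (PySem.List.pyRange 2 6 1).find? (fun k => r ^ k.toNat == n) with
      | none =>
        have hall := List.find?_eq_none.mp hf
        rw [pv_range25] at hall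
        have hid : innerA n r d = d := by
          apply innerA_id d (ne_of_lt hrltn)
          · have := hall 2 (by norm_num); norm_num [Int.toNat] at this; exact this
          · have := hall 3 (by norm_num); norm_num [Int.toNat] at this; exact this
          · have := hall 4 (by norm_num); norm_num [Int.toNat] at this; exact this
          · have := hall 5 (by norm_num); norm_num [Int.toNat] at this; exact this
        rw [hid, ih (r+1) d (by omega) (by omega) (fun p hp => lt_trans (hkeys p hp) (by omega)),
            bLoop_step hg, hf]
        simp
      | some k =>
        have hk_mem : k ∈ PySem.List.pyRange 2 6 1 := List.mem_of_find?_eq_some hf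
        rw [pv_range25] at hk_mem
        have hk : k = 2 ∨ k = 3 ∨ k = 4 ∨ k = 5 := by simpa using hk_mem
        have hpow : r ^ k.toNat = n := by
          have := List.find?_some hf; simpa using this
        have hins : innerA n r d = d.insert r (d.getD r k) :=
          innerA_hit d hr k (by tauto) hpow
        have hcon : d.contains r = false := pv_dict_fresh hkeys
        have hgetD : d.getD r k = k := PySem.Dict.getD_of_not_contains d k hcon
        have hitems : (d.insert r (d.getD r k)).items = d.items ++ [(r, k)] := by
          rw [hgetD]; exact PySem.Dict.items_insert_of_not_contains d k hcon
        have hkeys' : ∀ p ∈ (d.insert r (d.getD r k)).items, p.1 < r + 1 := by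
          intro p hp
          rw [hitems] at hp
          rcases List.mem_append.mp hp with h' | h'
          · exact lt_trans (hkeys p h') (by omega)
          · simp at h'; subst h'; omega
        rw [hins, ih (r+1) _ (by omega) (by omega) hkeys', hitems, bLoop_step hg, hf]
        simp
    · have hg : ¬ r * r ≤ n := by
        intro hg; have := (pv_sq_le_iff (by omega) (by omega)).mp hg; omega
      rw [PySem.List.pyRange_one_eq_nil (by omega), List.foldl_nil, bLoop_stop _ hg, List.append_nil]

theorem fold_tail {n : Int} (hn : 2 ≤ n) (d : PySem.Dict Int Int) :
    (PySem.List.pyRange (sI n + 1) n 1).foldl (fun d root => innerA n root d) d = d := by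
  have hcong : ∀ (acc : PySem.Dict Int Int) (x : Int), x ∈ PySem.List.pyRange (sI n + 1) n 1 →
      innerA n x acc = acc := by
    intro acc x hx
    rw [PySem.List.mem_pyRange_one] at hx
    have hs := pv_one_le_sI hn
    have hxx : ¬ x * x ≤ n := by
      intro hg; have := (pv_sq_le_iff (by omega) (by omega)).mp hg; omega
    have hsq : x ^ (2:Nat) = x * x := by ring
    have h2 : x ^ (2:Nat) ≠ n := by omega
    have hle : ∀ j : Nat, 2 ≤ j → x ^ (2:Nat) ≤ x ^ j := fun j hj =>
      pow_le_pow_right₀ (by omega) hj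
    apply innerA_id acc (by omega) h2
    · have := hle 3 (by norm_num); omega
    · have := hle 4 (by norm_num); omega
    · have := hle 5 (by norm_num); omega

  exact (PySem.List.foldl_congr_mem _ _ (fun acc _ => acc) _ hcong).trans (PySem.List.foldl_ignore _ _)

theorem fold_head {n : Int} (hn : 2 ≤ n) :
    (PySem.List.pyRange 0 2 1).foldl (fun d root => innerA n root d) PySem.Dict.empty
      = PySem.Dict.empty := by
  have h01 : PySem.List.pyRange 0 2 1 = [0, 1] := by decide
  have h0 : innerA n 0 PySem.Dict.empty = PySem.Dict.empty := by
    apply innerA_id <;> norm_num <;> omega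
  have h1 : innerA n 1 PySem.Dict.empty = PySem.Dict.empty := by
    apply innerA_id <;> norm_num <;> omega
  rw [h01, List.foldl_cons, h0, List.foldl_cons, h1, List.foldl_nil]

theorem main_pos {n : Int} (hn : 2 ≤ n) : get_root_power n = get_root_power_alt n := by
  have hs1 := pv_one_le_sI hn
  have hs2 := pv_sI_lt_self hn
  have hsplit : PySem.List.pyRange 0 (|n| + 1) 1 =
      ((PySem.List.pyRange 0 2 1 ++ PySem.List.pyRange 2 (sI n + 1) 1) ++
        PySem.List.pyRange (sI n + 1) n 1) ++ PySem.List.pyRange n (n+1) 1 := by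
    rw [abs_of_nonneg (by omega : (0:Int) ≤ n)]
    rw [← PySem.List.pyRange_one_append 0 2 (sI n + 1) (by omega) (by omega),
        ← PySem.List.pyRange_one_append 0 (sI n + 1) n (by omega) (by omega),
        ← PySem.List.pyRange_one_append 0 n (n+1) (by omega) (by omega)]
  have hmid : ((PySem.List.pyRange 2 (sI n + 1) 1).foldl (fun d root => innerA n root d)
      PySem.Dict.empty).items = bLoop n 2 [] := by
    have := fold_mid hn (sI n + 1 - 2).toNat 2 PySem.Dict.empty le_rfl le_rfl (by intro p hp; simp [PySem.Dict.empty] at hp)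
    simpa using this
  -- the dict after the whole loop
  have hkeys_lt : ∀ p ∈ ((PySem.List.pyRange 2 (sI n + 1) 1).foldl
      (fun d root => innerA n root d) PySem.Dict.empty).items, p.1 < n := by
    intro p hp
    rw [hmid] at hp
    rcases bLoop_mem (n + 1 - 2).toNat n 2 [] le_rfl p hp with h | h
    · simp at h
    · have := (pv_sq_le_iff (by omega) (by omega : (0:Int) ≤ p.1)).mp h.2
      omega
  set dmid := (PySem.List.pyRange 2 (sI n + 1) 1).foldl (fun d root => innerA n root d)
    PySem.Dict.empty with hdmid
  have hcon : dmid.contains n = false := pv_dict_fresh hkeys_lt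
  have hlast : innerA n n dmid = dmid.insert n (dmid.getD n 1) :=
    innerA_hit dmid hn 1 (by tauto) (by norm_num [Int.toNat])
  have hitems : (dmid.insert n (dmid.getD n 1)).items = bLoop n 2 [] ++ [(n, 1)] := by
    rw [PySem.Dict.getD_of_not_contains dmid 1 hcon,
        PySem.Dict.items_insert_of_not_contains dmid 1 hcon, hmid]
  unfold get_root_power get_root_power_alt
  rw [hsplit, List.foldl_append, List.foldl_append, List.foldl_append, fold_head hn,
      ← hdmid, fold_tail hn, PySem.List.pyRange_one_singleton, List.foldl_cons, List.foldl_nil,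
      hlast]
  have hsize : (dmid.insert n (dmid.getD n 1)).size ≠ 0 := by
    have : (dmid.insert n (dmid.getD n 1)).size = (bLoop n 2 [] ++ [(n, 1)]).length := by
      rw [← hitems]; rfl
    simp [this]
  rw [if_pos hsize, hitems, if_neg (by omega : ¬ n < 0), if_neg (by omega : ¬ n ≤ 1)]

theorem main_neg {n : Int} (hn : n < 0) : get_root_power n = get_root_power_alt n := by
  have hcong : ∀ (acc : PySem.Dict Int Int) (x : Int), x ∈ PySem.List.pyRange 0 (|n| + 1) 1 →
      innerA n x acc = acc := by
    intro acc x hx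
    rw [PySem.List.mem_pyRange_one] at hx
    have h2 : (0:Int) ≤ x ^ (2:Nat) := pow_nonneg (by omega) _
    have h3 : (0:Int) ≤ x ^ (3:Nat) := pow_nonneg (by omega) _
    have h4 : (0:Int) ≤ x ^ (4:Nat) := pow_nonneg (by omega) _
    have h5 : (0:Int) ≤ x ^ (5:Nat) := pow_nonneg (by omega) _
    apply innerA_id acc <;> omega
  unfold get_root_power get_root_power_alt
  rw [(PySem.List.foldl_congr_mem _ _ (fun acc _ => acc) _ hcong).trans
      (PySem.List.foldl_ignore _ _)]
  rw [if_neg (by simp [PySem.Dict.size_empty]), if_pos hn]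

-- ===== VERDICT (by name: the statement is the Claim_ definition above) =====
theorem get_root_power_spec : Claim_equal_get_root_power := by
  intro n _
  unfold Spec_get_root_power
  by_cases hneg : n < 0
  · exact main_neg hneg
  · by_cases h2 : 2 ≤ n
    · exact main_pos h2
    · have h01 : n = 0 ∨ n = 1 := by omega
      rcases h01 with rfl | rfl <;> decide
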